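-- pv_equiv track=rewrite | github.com/masmeert/advent-of-code | 2024/09.py | defragment
-- ===== SOURCE A (Python) =====
-- def find_fragments(disk):
--     occupied, empty = [], []
--     start = 0
--     for i in range(1, len(disk)):
--         if disk[i] != disk[start]:
--             (empty if disk[start] == -1 else occupied).append([start, i - 1])
--             start = i
--     if disk[start] != -1:
--         occupied.append([start, len(disk) - 1])
--     return occupied, empty
--
-- def defragment(disk):
--     defragmented = disk[:]
--     occupied, empty = find_fragments(disk)
--     for start, end in occupied[::-1]:
--         block_size = end - start + 1
--         for empty_block in empty:
--             empty_start, empty_end = empty_block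
--             if empty_start > start:
--                 break
--             if empty_end - empty_start + 1 >= block_size:
--                 (
--                     defragmented[empty_start : empty_start + block_size],
--                     defragmented[start : start + block_size],
--                 ) = (disk[start : start + block_size], [-1] * block_size)
--                 empty_block[0] += block_size
--                 if empty_block[0] > empty_block[1]:
--                     empty.remove(empty_block)
--                 break
--     return sum(i * n for i, n in enumerate(defragmented) if n != -1)
-- ===== SOURCE B (Python) =====
-- def defragment(disk):
--     # Different structure: one raw scan (no fragment-pair lists), gaps kept in a
--     # dict of buckets keyed by gap SIZE holding gap START positions; each file's
--     # destination is the minimum start over all buckets of sufficient size, so no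
--     # ordered gap list is scanned or maintained.
--     res = disk[:]
--     files = []
--     buckets = {}
--     n = len(disk)
--     i = 0
--     while i < n:
--         j = i + 1
--         while j < n and disk[j] == disk[i]:
--             j += 1
--         if disk[i] == -1:
--             buckets.setdefault(j - i, []).append(i)
--         else:
--             files.append((i, j - i))
--         i = j
--     for start, size in reversed(files):
--         best_start = None
--         best_size = None
--         for sz, starts in buckets.items():
--             if sz >= size and starts:
--                 m = min(starts)
--                 if best_start is None or m < best_start:
--                     best_start, best_size = m, sz
--         if best_start is not None and best_start <= start:
--             buckets[best_size].remove(best_start)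
--             rem = best_size - size
--             if rem > 0:
--                 buckets.setdefault(rem, []).append(best_start + size)
--             res[best_start:best_start + size] = disk[start:start + size]
--             res[start:start + size] = [-1] * size
--     return sum(p * v for p, v in enumerate(res) if v != -1)
-- ===== Notes on version B (the rewrite author's own statement) =====
-- stated objective: alternative
-- what changed: B drops A's fragment-pair lists and ordered gap-list scan entirely: one raw index scan collects files and puts gap start positions into a dict of buckets keyed by gap size, and each file's destination is the minimum start over all buckets of sufficient size (bucket moved between size keys on partial use), instead of A's in-order walk of a mutated [start,end] gap list with list.remove.
import Mathlib
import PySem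

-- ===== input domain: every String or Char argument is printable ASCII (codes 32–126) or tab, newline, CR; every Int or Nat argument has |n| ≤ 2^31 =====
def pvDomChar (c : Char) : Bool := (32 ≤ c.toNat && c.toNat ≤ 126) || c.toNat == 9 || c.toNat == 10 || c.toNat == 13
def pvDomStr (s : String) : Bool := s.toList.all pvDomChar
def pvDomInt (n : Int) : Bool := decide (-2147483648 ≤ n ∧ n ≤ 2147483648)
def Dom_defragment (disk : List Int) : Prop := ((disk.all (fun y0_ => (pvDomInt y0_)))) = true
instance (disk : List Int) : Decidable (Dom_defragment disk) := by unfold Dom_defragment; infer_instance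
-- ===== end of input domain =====

-- B re-implements the compaction with a different data organisation: one raw scan (no
-- fragment-pair lists), gaps bucketed in a dict keyed by gap SIZE holding start positions,
-- destination = minimum start over sufficiently large buckets; same return value on Pre_.

-- ===== PORT A =====

-- find_fragments' "for i in range(1, len(disk))" loop as a while-style recursion
-- (fuel = number of remaining indices, so the recursion is structural);
-- state = (occupied, empty, start)
def ffLoopF (disk : List Int) : Nat → List (Int × Int) → List (Int × Int) → Int → Int →
    List (Int × Int) × List (Int × Int) × Int
  | 0, occ, emp, start, _ => (occ, emp, start)
  | fuel + 1, occ, emp, start, i =>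
    if i < PySem.List.len disk then
      if PySem.List.pyGetD disk i 0 ≠ PySem.List.pyGetD disk start 0 then
        if PySem.List.pyGetD disk start 0 = -1 then
          ffLoopF disk fuel occ (emp ++ [(start, i - 1)]) i (i + 1)
        else
          ffLoopF disk fuel (occ ++ [(start, i - 1)]) emp i (i + 1)
      else ffLoopF disk fuel occ emp start (i + 1)
    else (occ, emp, start)

def ffLoop (disk : List Int) (occ emp : List (Int × Int)) (start i : Int) :
    List (Int × Int) × List (Int × Int) × Int :=
  ffLoopF disk ((PySem.List.len disk - i).toNat + 1) occ emp start i

def findFragments (disk : List Int) : List (Int × Int) × List (Int × Int) :=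
  let st := ffLoop disk [] [] 0 1
  if PySem.List.pyGetD disk st.2.2 0 ≠ -1 then
    (st.1 ++ [(st.2.2, PySem.List.len disk - 1)], st.2.1)
  else (st.1, st.2.1)

-- l[a:b] = v  (Python slice assignment for the 0 ≤ a ≤ b the program reaches)
def pySetSlice (l : List Int) (a b : Int) (v : List Int) : List Int :=
  PySem.List.slice l none (some a) ++ v ++ PySem.List.slice l (some (max a b)) none

-- A's inner "for empty_block in empty" loop; acc = already-scanned prefix (reversed);
-- the in-place mutation and empty.remove(empty_block) act on the reassembled full list
def aInner (start bs : Int) (acc : List (Int × Int)) :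
    List (Int × Int) → List (Int × Int) × Option Int
  | [] => (acc.reverse, none)
  | g :: rest =>
    if g.1 > start then (acc.reverse ++ g :: rest, none)
    else if g.2 - g.1 + 1 ≥ bs then
      let g' : Int × Int := (g.1 + bs, g.2)
      let full := acc.reverse ++ g' :: rest
      ((if g'.1 > g'.2 then ((PySem.List.remove? full g').getD full) else full), some g.1)
    else aInner start bs (g :: acc) rest

def aOuterStep (disk : List Int) (st : List Int × List (Int × Int)) (f : Int × Int) :
    List Int × List (Int × Int) :=
  let bs := f.2 - f.1 + 1
  match aInner f.1 bs [] st.2 with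
  | (emp', none) => (st.1, emp')
  | (emp', some es) =>
      let d1 := pySetSlice st.1 es (es + bs) (PySem.List.slice disk (some f.1) (some (f.1 + bs)))
      let d2 := pySetSlice d1 f.1 (f.1 + bs) (List.replicate bs.toNat (-1))
      (d2, emp')

def defragment (disk : List Int) : Int :=
  let fr := findFragments disk
  let st := fr.1.reverse.foldl (aOuterStep disk) (disk, fr.2)
  (((PySem.List.enumerate st.1 0).filter (fun p => p.2 ≠ -1)).map (fun p => p.1 * p.2)).sum

-- ===== PORT B =====

-- "while j < n and disk[j] == disk[i]: j += 1"  (fuel = remaining indices)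
def bRunEndF (disk : List Int) (i : Int) : Nat → Int → Int
  | 0, j => j
  | fuel + 1, j =>
    if j < PySem.List.len disk then
      if PySem.List.pyGetD disk j 0 = PySem.List.pyGetD disk i 0 then bRunEndF disk i fuel (j + 1)
      else j
    else j

def bRunEnd (disk : List Int) (i j : Int) : Int :=
  bRunEndF disk i ((PySem.List.len disk - j).toNat + 1) j

-- buckets.setdefault(k, []).append(v)
def bBucketAdd (b : PySem.Dict Int (List Int)) (k v : Int) : PySem.Dict Int (List Int) :=
  b.insert k (b.getD k [] ++ [v])

-- B's raw scan: "while i < n: j = i + 1; while …; …; i = j"  (fuel = remaining indices)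
def bScanLoopF (disk : List Int) : Nat → List (Int × Int) → PySem.Dict Int (List Int) → Int →
    List (Int × Int) × PySem.Dict Int (List Int)
  | 0, files, buckets, _ => (files, buckets)
  | fuel + 1, files, buckets, i =>
    if i < PySem.List.len disk then
      let j := bRunEnd disk i (i + 1)
      if PySem.List.pyGetD disk i 0 = -1 then
        bScanLoopF disk fuel files (bBucketAdd buckets (j - i) i) j
      else bScanLoopF disk fuel (files ++ [(i, j - i)]) buckets j
    else (files, buckets)

def bScanLoop (disk : List Int) (files : List (Int × Int)) (buckets : PySem.Dict Int (List Int))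
    (i : Int) : List (Int × Int) × PySem.Dict Int (List Int) :=
  bScanLoopF disk ((PySem.List.len disk - i).toNat + 1) files buckets i

-- one iteration of "for sz, starts in buckets.items(): …"
def bBestStep (size : Int) (best : Option (Int × Int)) (p : Int × List Int) :
    Option (Int × Int) :=
  if p.1 ≥ size ∧ p.2 ≠ [] then
    match PySem.List.min? p.2 (fun x => x) with
    | some m =>
      match best with
      | none => some (m, p.1)
      | some b => if m < b.1 then some (m, p.1) else best
    | none => best
  else best

-- the loop computing (best_start, best_size)
def bBest (size : Int) (items : List (Int × List Int)) : Option (Int × Int) :=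
  items.foldl (bBestStep size) none

def bStep (disk : List Int) (st : List Int × PySem.Dict Int (List Int)) (f : Int × Int) :
    List Int × PySem.Dict Int (List Int) :=
  match bBest f.2 st.2.items with
  | none => st
  | some (m, bsz) =>
    if m ≤ f.1 then
      let old := st.2.getD bsz []
      let b1 := st.2.insert bsz ((PySem.List.remove? old m).getD old)
      let rem := bsz - f.2
      let b2 := if rem > 0 then bBucketAdd b1 rem (m + f.2) else b1
      let r1 := pySetSlice st.1 m (m + f.2) (PySem.List.slice disk (some f.1) (some (f.1 + f.2)))
      let r2 := pySetSlice r1 f.1 (f.1 + f.2) (List.replicate f.2.toNat (-1))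
      (r2, b2)
    else st

def defragment_alt (disk : List Int) : Int :=
  let s := bScanLoop disk [] PySem.Dict.empty 0
  let fin := s.1.reverse.foldl (bStep disk) (disk, s.2)
  (((PySem.List.enumerate fin.1 0).filter (fun p => p.2 ≠ -1)).map (fun p => p.1 * p.2)).sum

-- ===== PRECONDITION & SPEC =====

-- find_fragments reads disk[0] unconditionally, so A raises IndexError on the empty list
def Pre_defragment (disk : List Int) : Prop := disk ≠ []
instance (disk : List Int) : Decidable (Pre_defragment disk) := by unfold Pre_defragment; infer_instance

def pvWitness_defragment : List Int := [0, 0, -1, 2]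

def Spec_defragment (disk : List Int) (out : Int) : Prop := out = defragment_alt disk
instance (disk : List Int) (out : Int) : Decidable (Spec_defragment disk out) := by unfold Spec_defragment; infer_instance

-- ===== CLAIM (what is proved, stated in full; the proofs are below) =====
def Claim_equal_defragment : Prop :=
  ∀ (disk : List Int), Dom_defragment disk → Pre_defragment disk → Spec_defragment disk (defragment disk)

-- ===== LEMMAS AND PROOFS =====

-- ---------- unfolding the fueled while-loops ----------

theorem ffLoop_eq (disk : List Int) (occ emp : List (Int × Int)) (start i : Int) :
    ffLoop disk occ emp start i =
      if i < PySem.List.len disk then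
        if PySem.List.pyGetD disk i 0 ≠ PySem.List.pyGetD disk start 0 then
          if PySem.List.pyGetD disk start 0 = -1 then
            ffLoop disk occ (emp ++ [(start, i - 1)]) i (i + 1)
          else
            ffLoop disk (occ ++ [(start, i - 1)]) emp i (i + 1)
        else ffLoop disk occ emp start (i + 1)
      else (occ, emp, start) := by
  conv_lhs => rw [ffLoop]
  by_cases h : i < PySem.List.len disk
  · have hn : (PySem.List.len disk - i).toNat = (PySem.List.len disk - (i + 1)).toNat + 1 := by
      simp only [PySem.List.len_eq] at *; omega
    rw [hn]
    simp only [ffLoopF, if_pos h, ffLoop]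
  · simp only [ffLoopF, if_neg h]

theorem bRunEnd_eq (disk : List Int) (i j : Int) :
    bRunEnd disk i j =
      if j < PySem.List.len disk then
        if PySem.List.pyGetD disk j 0 = PySem.List.pyGetD disk i 0 then bRunEnd disk i (j + 1)
        else j
      else j := by
  conv_lhs => rw [bRunEnd]
  by_cases h : j < PySem.List.len disk
  · have hn : (PySem.List.len disk - j).toNat = (PySem.List.len disk - (j + 1)).toNat + 1 := by
      simp only [PySem.List.len_eq] at *; omega
    rw [hn]
    simp only [bRunEndF, if_pos h, bRunEnd]
  · simp only [bRunEndF, if_neg h]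

theorem le_bRunEnd (disk : List Int) (i j : Int) : j ≤ bRunEnd disk i j := by
  unfold bRunEnd
  generalize (PySem.List.len disk - j).toNat + 1 = f
  induction f generalizing j with
  | zero => simp [bRunEndF]
  | succ n ih =>
    simp only [bRunEndF]
    split
    · split
      · have := ih (j + 1); omega
      · omega
    · omega

theorem bScanLoopF_irrel (disk : List Int) (f1 : Nat) :
    ∀ (f2 : Nat) (files : List (Int × Int)) (buckets : PySem.Dict Int (List Int)) (i : Int),
      (PySem.List.len disk - i).toNat < f1 → (PySem.List.len disk - i).toNat < f2 →
      bScanLoopF disk f1 files buckets i = bScanLoopF disk f2 files buckets i := by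
  induction f1 with
  | zero => intro _ _ _ _ h; omega
  | succ n ih =>
    intro f2 files buckets i h1 h2
    match f2, h2 with
    | f2 + 1, h2 =>
      simp only [bScanLoopF]
      by_cases h : i < PySem.List.len disk
      · simp only [if_pos h]
        have hj : i + 1 ≤ bRunEnd disk i (i + 1) := le_bRunEnd disk i (i + 1)
        have hb1 : (PySem.List.len disk - bRunEnd disk i (i + 1)).toNat < n := by
          simp only [PySem.List.len_eq] at *; omega
        have hb2 : (PySem.List.len disk - bRunEnd disk i (i + 1)).toNat < f2 := by
          simp only [PySem.List.len_eq] at *; omega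
        split <;> exact ih f2 _ _ _ hb1 hb2
      · simp only [if_neg h]

theorem bScanLoop_eq (disk : List Int) (files : List (Int × Int))
    (buckets : PySem.Dict Int (List Int)) (i : Int) :
    bScanLoop disk files buckets i =
      if i < PySem.List.len disk then
        let j := bRunEnd disk i (i + 1)
        if PySem.List.pyGetD disk i 0 = -1 then
          bScanLoop disk files (bBucketAdd buckets (j - i) i) j
        else bScanLoop disk (files ++ [(i, j - i)]) buckets j
      else (files, buckets) := by
  conv_lhs => rw [bScanLoop]
  have hg : ∃ m, (PySem.List.len disk - i).toNat + 1 = m + 1 ∧ m = (PySem.List.len disk - i).toNat :=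
    ⟨_, rfl, rfl⟩
  obtain ⟨m, hm, hmv⟩ := hg
  rw [hm]
  by_cases h : i < PySem.List.len disk
  · simp only [bScanLoopF, if_pos h]
    have hj : i + 1 ≤ bRunEnd disk i (i + 1) := le_bRunEnd disk i (i + 1)
    simp only [bScanLoop]
    split <;>
      (apply bScanLoopF_irrel <;> simp only [PySem.List.len_eq] at * <;> omega)
  · simp only [bScanLoopF, if_neg h]

-- ---------- canonical run decomposition (proof-side) ----------

-- maximal equal runs of l, as (start, length, value), absolute start positions from s
def runsAux (s : Nat) : List Int → List (Nat × Nat × Int)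
  | [] => []
  | x :: xs =>
    (s, (xs.takeWhile (· == x)).length + 1, x) ::
      runsAux (s + (xs.takeWhile (· == x)).length + 1) (xs.drop (xs.takeWhile (· == x)).length)
termination_by l => l.length
decreasing_by simp

-- starts are consecutive, sizes ≥ 1, ending exactly at q
def chainR : Nat → Nat → List (Nat × Nat × Int) → Prop
  | p, q, [] => p = q
  | p, q, r :: rs => r.1 = p ∧ 1 ≤ r.2.1 ∧ chainR (p + r.2.1) q rs

@[simp] theorem chainR_nil (p q : Nat) : chainR p q [] ↔ p = q := Iff.rfl
@[simp] theorem chainR_cons (p q : Nat) (r : Nat × Nat × Int) (rs : List (Nat × Nat × Int)) :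
    chainR p q (r :: rs) ↔ r.1 = p ∧ 1 ≤ r.2.1 ∧ chainR (p + r.2.1) q rs := Iff.rfl

theorem runs_chainR (s : Nat) (l : List Int) : chainR s (s + l.length) (runsAux s l) := by
  induction s, l using runsAux.induct with
  | case1 s => simp [runsAux]
  | case2 s x xs ih =>
    rw [runsAux]
    rw [chainR_cons]
    refine ⟨rfl, by simp, ?_⟩
    have hk : (xs.takeWhile (· == x)).length ≤ xs.length := (List.takeWhile_sublist _).length_le
    have h1 : s + ((xs.takeWhile (· == x)).length + 1)
        = s + (xs.takeWhile (· == x)).length + 1 := by omega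
    have h2 : s + (x :: xs).length = (s + (xs.takeWhile (· == x)).length + 1)
        + (xs.drop (xs.takeWhile (· == x)).length).length := by
      simp; omega
    rw [h1, h2]
    exact ih

theorem chainR_le (rs : List (Nat × Nat × Int)) : ∀ (p q : Nat), chainR p q rs → p ≤ q := by
  induction rs with
  | nil => intro p q h; rw [chainR_nil] at h; omega
  | cons r rest ih =>
    intro p q h
    rw [chainR_cons] at h
    have := ih _ _ h.2.2
    omega

theorem chainR_ge (rs : List (Nat × Nat × Int)) : ∀ (p q : Nat), chainR p q rs →
    ∀ r ∈ rs, p ≤ r.1 ∧ 1 ≤ r.2.1 ∧ r.1 + r.2.1 ≤ q := by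
  induction rs with
  | nil => intro p q h r hr; simp at hr
  | cons a rest ih =>
    intro p q h r hr
    rw [chainR_cons] at h
    obtain ⟨ha, h1, h2⟩ := h
    rcases List.mem_cons.mp hr with hr | hr
    · subst hr
      have := chainR_le _ _ _ h2
      omega
    · have := ih _ _ h2 r hr
      omega

theorem chainR_pairwise (rs : List (Nat × Nat × Int)) : ∀ (p q : Nat), chainR p q rs →
    rs.Pairwise (fun a b => a.1 + a.2.1 ≤ b.1) := by
  induction rs with
  | nil => intro _ _ _; simp
  | cons a rest ih =>
    intro p q h
    rw [chainR_cons] at h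
    obtain ⟨ha, h1, h2⟩ := h
    refine List.Pairwise.cons ?_ (ih _ _ h2)
    intro b hb
    have := chainR_ge _ _ _ h2 b hb
    omega

theorem chainR_append_last (init : List (Nat × Nat × Int)) :
    ∀ (r : Nat × Nat × Int) (p q : Nat), chainR p q (init ++ [r]) → r.1 + r.2.1 = q := by
  induction init with
  | nil =>
    intro r p q h
    rw [List.nil_append, chainR_cons] at h
    obtain ⟨h1, -, h2⟩ := h
    rw [chainR_nil] at h2
    omega
  | cons a rest ih =>
    intro r p q h
    rw [List.cons_append, chainR_cons] at h
    exact ih r _ q h.2.2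

theorem pairwise_mem_rel {α : Type} {R : α → α → Prop} {l : List α} (h : l.Pairwise R)
    {a b : α} (ha : a ∈ l) (hb : b ∈ l) (hne : a ≠ b) : R a b ∨ R b a := by
  induction l with
  | nil => simp at ha
  | cons x t ih =>
    rcases List.pairwise_cons.mp h with ⟨hx, ht⟩
    rcases List.mem_cons.mp ha with ha | ha <;> rcases List.mem_cons.mp hb with hb | hb
    · exact absurd (ha.symm ▸ hb.symm ▸ rfl) hne
    · exact Or.inl (ha ▸ hx b hb)
    · exact Or.inr (hb ▸ hx a ha)
    · exact ih ht ha hb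

-- cells of the leading equal run
theorem lead_cells (xs : List Int) (x : Int) :
    ∀ t : Nat, t < (xs.takeWhile (· == x)).length → xs[t]? = some x := by
  induction xs with
  | nil => simp
  | cons y ys ih =>
    intro t ht
    by_cases hy : y = x
    · simp [hy] at ht
      cases t with
      | zero => simp [hy]
      | succ u => simpa using ih u (by omega)
    · simp [hy] at ht

theorem lead_drop_head (xs : List Int) (x y : Int) (ys : List Int)
    (h : xs.drop (xs.takeWhile (· == x)).length = y :: ys) : y ≠ x := by
  induction xs generalizing ys with
  | nil => simp at h
  | cons z zs ih =>
    by_cases hz : z = x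
    · simp only [List.takeWhile_cons, hz] at h
      simp at h
      exact ih _ h
    · simp [hz] at h
      intro hy; exact hz (h.1.trans hy)

-- cells of every run (absolute positions, via the drop discipline)
theorem runs_cells (disk : List Int) (s : Nat) (l : List Int) (hd : disk.drop s = l) :
    ∀ r ∈ runsAux s l, ∀ t : Nat, t < r.2.1 → disk[r.1 + t]? = some r.2.2 := by
  induction s, l using runsAux.induct with
  | case1 s => simp [runsAux]
  | case2 s x xs ih =>
    have hget : ∀ u : Nat, disk[s + u]? = (x :: xs)[u]? := by
      intro u
      rw [← hd, List.getElem?_drop]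
    intro r hrm t ht
    rw [runsAux] at hrm
    rcases List.mem_cons.mp hrm with rfl | hr
    · simp only []
      rcases t with _ | u
      · simpa using hget 0
      · have hu : u < (xs.takeWhile (· == x)).length := by
          simp only [] at ht; omega
        have := lead_cells xs x u hu
        rw [hget (u + 1)]
        simpa using this
    · have hdd : disk.drop (s + (xs.takeWhile (· == x)).length + 1)
          = xs.drop (xs.takeWhile (· == x)).length := by
        have h1 : disk.drop (s + 1) = xs := by
          rw [← List.drop_drop]  -- drop 1 (drop s disk)? orientation checked below
          rw [hd]
          rfl
        calc disk.drop (s + (xs.takeWhile (· == x)).length + 1)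
            = (disk.drop (s + 1)).drop (xs.takeWhile (· == x)).length := by
              rw [List.drop_drop]; ring_nf
          _ = xs.drop (xs.takeWhile (· == x)).length := by rw [h1]
      exact ih hdd r hr t ht

-- the cell right after a run differs from the run value (or is absent)
-- ---------- views of the run list used by the two ports ----------

def fileRuns (rs : List (Nat × Nat × Int)) : List (Nat × Nat × Int) :=
  rs.filter (fun r => r.2.2 != -1)
def gapRuns (rs : List (Nat × Nat × Int)) : List (Nat × Nat × Int) :=
  rs.filter (fun r => r.2.2 == -1)
-- B's file list: (start, size)
def bFiles (rs : List (Nat × Nat × Int)) : List (Int × Int) :=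
  (fileRuns rs).map (fun r => ((r.1 : Int), (r.2.1 : Int)))
-- B's (size, start) pairs fed to the buckets
def bGapPairs (rs : List (Nat × Nat × Int)) : List (Int × Int) :=
  (gapRuns rs).map (fun r => ((r.2.1 : Int), (r.1 : Int)))
-- A's [start, end] pairs
def aOcc (rs : List (Nat × Nat × Int)) : List (Int × Int) :=
  (fileRuns rs).map (fun r => ((r.1 : Int), (r.1 : Int) + (r.2.1 : Int) - 1))
def aEmp (rs : List (Nat × Nat × Int)) : List (Int × Int) :=
  (gapRuns rs).map (fun r => ((r.1 : Int), (r.1 : Int) + (r.2.1 : Int) - 1))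

-- ---------- B's scan produces exactly the runs ----------

theorem bRunEnd_go (disk : List Int) (iv x : Int) (hx : PySem.List.pyGetD disk iv 0 = x) :
    ∀ (ys : List Int) (j : Nat), disk.drop j = ys →
      bRunEnd disk iv (j : Int) = (j : Int) + ((ys.takeWhile (· == x)).length : Int) := by
  intro ys
  induction ys with
  | nil =>
    intro j hd
    have hlen : disk.length ≤ j := by
      have := congrArg List.length hd
      simp at this
      omega
    rw [bRunEnd_eq]
    rw [if_neg (by simp [PySem.List.len_eq]; exact_mod_cast hlen)]
    simp
  | cons y t ihy =>
    intro j hd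
    have hj : j < disk.length := by
      have := congrArg List.length hd
      simp at this
      omega
    have hy : disk[j]? = some y := by
      have := congrArg (fun u => u[0]?) hd
      simpa [List.getElem?_drop] using this
    have hgy : PySem.List.pyGetD disk (j : Int) 0 = y := by
      rw [PySem.List.pyGetD_natCast, List.getD_eq_getElem?_getD, hy]
      rfl
    rw [bRunEnd_eq]
    rw [if_pos (by simp [PySem.List.len_eq]; exact_mod_cast hj)]
    rw [hgy, hx]
    by_cases hyx : y = x
    · rw [if_pos hyx]
      have hdt : disk.drop (j + 1) = t := by
        have : disk.drop (j + 1) = (disk.drop j).drop 1 := by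
          rw [List.drop_drop]
        rw [this, hd]
        rfl
      have := ihy (j + 1) hdt
      push_cast at this ⊢
      rw [show (j : Int) + 1 = ((j : Nat) : Int) + 1 by norm_num] at this
      simp [hyx]
      omega
    · rw [if_neg hyx]
      simp [hyx]

theorem bScan_spec (disk : List Int) (s : Nat) (l : List Int) (hd : disk.drop s = l) :
    ∀ (files : List (Int × Int)) (buckets : PySem.Dict Int (List Int)),
      bScanLoop disk files buckets (s : Int) =
        (files ++ bFiles (runsAux s l),
         (bGapPairs (runsAux s l)).foldl (fun b p => bBucketAdd b p.1 p.2) buckets) := by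
  induction s, l using runsAux.induct with
  | case1 s =>
    intro files buckets
    have hlen : disk.length ≤ s := by
      have := congrArg List.length hd
      simp at this
      omega
    rw [bScanLoop_eq]
    rw [if_neg (by simp [PySem.List.len_eq]; exact_mod_cast hlen)]
    simp [runsAux, bFiles, bGapPairs, fileRuns, gapRuns]
  | case2 s x xs ih =>
    intro files buckets
    have hj : s < disk.length := by
      have := congrArg List.length hd
      simp at this
      omega
    have hx : disk[s]? = some x := by
      have := congrArg (fun u => u[0]?) hd
      simpa [List.getElem?_drop] using this
    have hgx : PySem.List.pyGetD disk (s : Int) 0 = x := by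
      rw [PySem.List.pyGetD_natCast, List.getD_eq_getElem?_getD, hx]
      rfl
    have hdt : disk.drop (s + 1) = xs := by
      have : disk.drop (s + 1) = (disk.drop s).drop 1 := by rw [List.drop_drop]
      rw [this, hd]
      rfl
    have hre : bRunEnd disk (s : Int) ((s : Int) + 1)
        = (s : Int) + 1 + ((xs.takeWhile (· == x)).length : Int) := by
      have h0 := bRunEnd_go disk (s : Int) x hgx xs (s + 1) hdt
      have hc : ((s + 1 : Nat) : Int) = (s : Int) + 1 := by push_cast; ring
      rw [hc] at h0
      exact h0
    have hre2 : bRunEnd disk (s : Int) ((s : Int) + 1)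
        = ((s + (xs.takeWhile (· == x)).length + 1 : Nat) : Int) := by
      rw [hre]; push_cast; ring
    have hdd : disk.drop (s + (xs.takeWhile (· == x)).length + 1)
        = xs.drop (xs.takeWhile (· == x)).length := by
      calc disk.drop (s + (xs.takeWhile (· == x)).length + 1)
          = (disk.drop (s + 1)).drop (xs.takeWhile (· == x)).length := by
            rw [List.drop_drop]; ring_nf
        _ = xs.drop (xs.takeWhile (· == x)).length := by rw [hdt]
    have ihh := ih hdd
    rw [bScanLoop_eq]
    rw [if_pos (by simp [PySem.List.len_eq]; exact_mod_cast hj)]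
    simp only [hgx, hre2]
    have harg : ((s + (xs.takeWhile (· == x)).length + 1 : Nat) : Int) - (s : Int)
        = ((xs.takeWhile (· == x)).length : Int) + 1 := by push_cast; ring
    rw [harg]
    rw [runsAux]
    by_cases hneg : x = -1
    · rw [if_pos hneg]
      rw [ihh]
      have hgap : bGapPairs ((s, (xs.takeWhile (· == x)).length + 1, x) ::
          runsAux (s + (xs.takeWhile (· == x)).length + 1)
            (xs.drop (xs.takeWhile (· == x)).length))
          = (((xs.takeWhile (· == x)).length : Int) + 1, (s : Int)) ::
            bGapPairs (runsAux (s + (xs.takeWhile (· == x)).length + 1)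
              (xs.drop (xs.takeWhile (· == x)).length)) := by
        simp [bGapPairs, gapRuns, hneg]
      have hfile : bFiles ((s, (xs.takeWhile (· == x)).length + 1, x) ::
          runsAux (s + (xs.takeWhile (· == x)).length + 1)
            (xs.drop (xs.takeWhile (· == x)).length))
          = bFiles (runsAux (s + (xs.takeWhile (· == x)).length + 1)
              (xs.drop (xs.takeWhile (· == x)).length)) := by
        simp [bFiles, fileRuns, hneg]
      rw [hgap, hfile]
      simp only [List.foldl_cons]
    · rw [if_neg hneg]
      rw [ihh]
      have hgap : bGapPairs ((s, (xs.takeWhile (· == x)).length + 1, x) ::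
          runsAux (s + (xs.takeWhile (· == x)).length + 1)
            (xs.drop (xs.takeWhile (· == x)).length))
          = bGapPairs (runsAux (s + (xs.takeWhile (· == x)).length + 1)
              (xs.drop (xs.takeWhile (· == x)).length)) := by
        simp [bGapPairs, gapRuns, hneg]
      have hfile : bFiles ((s, (xs.takeWhile (· == x)).length + 1, x) ::
          runsAux (s + (xs.takeWhile (· == x)).length + 1)
            (xs.drop (xs.takeWhile (· == x)).length))
          = ((s : Int), ((xs.takeWhile (· == x)).length : Int) + 1) ::
            bFiles (runsAux (s + (xs.takeWhile (· == x)).length + 1)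
              (xs.drop (xs.takeWhile (· == x)).length)) := by
        simp [bFiles, fileRuns, hneg]
      rw [hgap, hfile]
      simp

-- ---------- A's index loop produces exactly the runs ----------

theorem getLastD_cons_of_ne_nil {α : Type} (a d : α) (l : List α) (h : l ≠ []) :
    (a :: l).getLastD d = l.getLastD d := by
  rw [List.getLastD_cons]
  induction l with
  | nil => simp at h
  | cons b t ih =>
    cases t with
    | nil => rfl
    | cons c u => simpa using ih (by simp)

theorem runsAux_ne_nil (s : Nat) (l : List Int) (h : l ≠ []) : runsAux s l ≠ [] := by
  cases l with
  | nil => simp at h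
  | cons x xs => rw [runsAux]; simp

-- stepping through cells equal to disk[start] leaves the loop state unchanged
theorem ff_through (disk : List Int) (s : Nat) :
    ∀ (m i : Nat), (∀ t : Nat, i ≤ t → t < i + m → disk[t]? = disk[s]?) →
      i + m ≤ disk.length →
      ∀ (occ emp : List (Int × Int)),
        ffLoop disk occ emp (s : Int) (i : Int) = ffLoop disk occ emp (s : Int) ((i + m : Nat) : Int) := by
  intro m
  induction m with
  | zero => intro i _ _ occ emp; norm_num
  | succ m ihm =>
    intro i hcell hlen occ emp
    have hi : i < disk.length := by omega
    have hieq : disk[i]? = disk[s]? := hcell i (le_refl i) (by omega)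
    have hs : s < disk.length := by
      rcases hx : disk[i]? with _ | y
      · rw [hx] at hieq
        exact absurd hx (by simp [hi])
      · rw [hx] at hieq
        by_contra hc
        rw [List.getElem?_eq_none (by omega)] at hieq
        simp at hieq
    have hgi : PySem.List.pyGetD disk (i : Int) 0 = PySem.List.pyGetD disk (s : Int) 0 := by
      rw [PySem.List.pyGetD_natCast, PySem.List.pyGetD_natCast,
        List.getD_eq_getElem?_getD, List.getD_eq_getElem?_getD, hieq]
    rw [ffLoop_eq]
    rw [if_pos (by simp [PySem.List.len_eq]; exact_mod_cast hi)]
    rw [if_neg (by simp [hgi])]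
    have hc1 : (i : Int) + 1 = ((i + 1 : Nat) : Int) := by push_cast; ring
    rw [hc1]
    have := ihm (i + 1) (fun t h1 h2 => hcell t (by omega) (by omega)) (by omega) occ emp
    rw [this]
    congr 1
    omega

theorem ff_spec (disk : List Int) (s : Nat) (l : List Int) (hd : disk.drop s = l) (hne : l ≠ []) :
    ∀ (occ emp : List (Int × Int)),
      ffLoop disk occ emp (s : Int) ((s : Int) + 1) =
        (occ ++ aOcc (runsAux s l).dropLast, emp ++ aEmp (runsAux s l).dropLast,
         (((runsAux s l).getLastD (0, 0, 0)).1 : Int)) := by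
  induction s, l using runsAux.induct with
  | case1 s => exact absurd rfl hne
  | case2 s x xs ih =>
    intro occ emp
    have hlen : (x :: xs).length = disk.length - s := by
      have := congrArg List.length hd
      simpa using this.symm
    have hj : s < disk.length := by simp at hlen; omega
    have hk : (xs.takeWhile (· == x)).length ≤ xs.length := (List.takeWhile_sublist _).length_le
    have hx : disk[s]? = some x := by
      have := congrArg (fun u => u[0]?) hd
      simpa [List.getElem?_drop] using this
    have hgx : PySem.List.pyGetD disk (s : Int) 0 = x := by
      rw [PySem.List.pyGetD_natCast, List.getD_eq_getElem?_getD, hx]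
      rfl
    have hcells := runs_cells disk s (x :: xs) hd _ (by rw [runsAux]; exact List.mem_cons_self ..)
    -- step through the head run's remaining cells
    have hthrough := ff_through disk s (xs.takeWhile (· == x)).length (s + 1)
      (fun t h1 h2 => by
        have := hcells (t - s) (by simp; omega)
        simp only [] at this
        rw [show s + (t - s) = t by omega] at this
        rw [this, hx]) (by simp at hlen; omega) occ emp
    have hc1 : ((s : Int) + 1) = ((s + 1 : Nat) : Int) := by push_cast; ring
    rw [hc1, hthrough]
    have hdd : disk.drop (s + (xs.takeWhile (· == x)).length + 1)
        = xs.drop (xs.takeWhile (· == x)).length := by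
      have hdt : disk.drop (s + 1) = xs := by
        have h0 : disk.drop (s + 1) = (disk.drop s).drop 1 := by rw [List.drop_drop]
        rw [h0, hd]
        rfl
      calc disk.drop (s + (xs.takeWhile (· == x)).length + 1)
          = (disk.drop (s + 1)).drop (xs.takeWhile (· == x)).length := by
            rw [List.drop_drop]; ring_nf
        _ = xs.drop (xs.takeWhile (· == x)).length := by rw [hdt]
    rcases hrest : xs.drop (xs.takeWhile (· == x)).length with _ | ⟨y, ys⟩
    · -- the head run is the last one: the loop index has reached the end
      have hkk : (xs.takeWhile (· == x)).length = xs.length := by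
        have := congrArg List.length hrest
        simp at this
        omega
      have hend : s + 1 + (xs.takeWhile (· == x)).length = disk.length := by
        simp at hlen; omega
      rw [ffLoop_eq]
      rw [if_neg (by simp [PySem.List.len_eq]; exact_mod_cast hend.ge)]
      rw [runsAux, hrest]
      simp [runsAux, aOcc, aEmp, fileRuns, gapRuns]
    · -- a next run starts at s + k + 1
      have hnext : s + 1 + (xs.takeWhile (· == x)).length < disk.length := by
        have := congrArg List.length hrest
        simp at this hlen
        omega
      have hy : disk[s + (xs.takeWhile (· == x)).length + 1]? = some y := by
        have := congrArg (fun u => u[0]?) hdd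
        rw [hrest] at this
        simpa [List.getElem?_drop] using this
      have hyx : y ≠ x := lead_drop_head xs x y ys hrest
      have hgy : PySem.List.pyGetD disk ((s + 1 + (xs.takeWhile (· == x)).length : Nat) : Int) 0 = y := by
        rw [PySem.List.pyGetD_natCast, List.getD_eq_getElem?_getD]
        rw [show s + 1 + (xs.takeWhile (· == x)).length = s + (xs.takeWhile (· == x)).length + 1 by omega]
        rw [hy]
        rfl
      rw [ffLoop_eq]
      rw [if_pos (by simp [PySem.List.len_eq]; exact_mod_cast hnext)]
      rw [if_pos (by rw [hgy, hgx]; simp [hyx])]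
      have hrec := ih hdd (by rw [hrest]; simp)
      have hc2 : ((s + 1 + (xs.takeWhile (· == x)).length : Nat) : Int) + 1
          = ((s + (xs.takeWhile (· == x)).length + 1 : Nat) : Int) + 1 := by push_cast; ring
      have hc3 : ((s + 1 + (xs.takeWhile (· == x)).length : Nat) : Int)
          = ((s + (xs.takeWhile (· == x)).length + 1 : Nat) : Int) := by push_cast; ring
      by_cases hneg : x = -1
      · rw [if_pos (by rw [hgx]; exact hneg)]
        rw [hc2, hc3, hrec]
        rw [runsAux, hrest]
        have hnn : runsAux (s + (xs.takeWhile (· == x)).length + 1) (y :: ys) ≠ [] :=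
          runsAux_ne_nil _ _ (by simp)
        rw [List.dropLast_cons_of_ne_nil hnn]
        rw [getLastD_cons_of_ne_nil _ _ _ hnn]
        have hemp : aEmp ((s, (xs.takeWhile (· == x)).length + 1, x) ::
            (runsAux (s + (xs.takeWhile (· == x)).length + 1) (y :: ys)).dropLast)
            = ((s : Int), (s : Int) + ((xs.takeWhile (· == x)).length + 1 : Int) - 1) ::
              aEmp ((runsAux (s + (xs.takeWhile (· == x)).length + 1) (y :: ys)).dropLast) := by
          simp [aEmp, gapRuns, hneg]
        have hocc : aOcc ((s, (xs.takeWhile (· == x)).length + 1, x) ::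
            (runsAux (s + (xs.takeWhile (· == x)).length + 1) (y :: ys)).dropLast)
            = aOcc ((runsAux (s + (xs.takeWhile (· == x)).length + 1) (y :: ys)).dropLast) := by
          simp [aOcc, fileRuns, hneg]
        rw [hemp, hocc]
        have hpair : ((s : Int), ((s + (xs.takeWhile (· == x)).length + 1 : Nat) : Int) - 1)
            = ((s : Int), (s : Int) + ((xs.takeWhile (· == x)).length + 1 : Int) - 1) := by
          congr 1
        rw [hpair]
        simp
      · rw [if_neg (by rw [hgx]; exact hneg)]
        rw [hc2, hc3, hrec]
        rw [runsAux, hrest]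
        have hnn : runsAux (s + (xs.takeWhile (· == x)).length + 1) (y :: ys) ≠ [] :=
          runsAux_ne_nil _ _ (by simp)
        rw [List.dropLast_cons_of_ne_nil hnn]
        rw [getLastD_cons_of_ne_nil _ _ _ hnn]
        have hocc : aOcc ((s, (xs.takeWhile (· == x)).length + 1, x) ::
            (runsAux (s + (xs.takeWhile (· == x)).length + 1) (y :: ys)).dropLast)
            = ((s : Int), (s : Int) + ((xs.takeWhile (· == x)).length + 1 : Int) - 1) ::
              aOcc ((runsAux (s + (xs.takeWhile (· == x)).length + 1) (y :: ys)).dropLast) := by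
          simp [aOcc, fileRuns, hneg]
        have hemp : aEmp ((s, (xs.takeWhile (· == x)).length + 1, x) ::
            (runsAux (s + (xs.takeWhile (· == x)).length + 1) (y :: ys)).dropLast)
            = aEmp ((runsAux (s + (xs.takeWhile (· == x)).length + 1) (y :: ys)).dropLast) := by
          simp [aEmp, gapRuns, hneg]
        rw [hemp, hocc]
        have hpair : ((s : Int), ((s + (xs.takeWhile (· == x)).length + 1 : Nat) : Int) - 1)
            = ((s : Int), (s : Int) + ((xs.takeWhile (· == x)).length + 1 : Int) - 1) := by
          congr 1
        rw [hpair]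
        simp

theorem dropLast_append_getLastD {α : Type} (l : List α) (h : l ≠ []) (d : α) :
    l.dropLast ++ [l.getLastD d] = l := by
  rw [List.getLastD_eq_getLast?, List.getLast?_eq_some_getLast h]
  exact List.dropLast_append_getLast h

theorem aOcc_append (u v : List (Nat × Nat × Int)) : aOcc (u ++ v) = aOcc u ++ aOcc v := by
  simp [aOcc, fileRuns]

theorem aEmp_append (u v : List (Nat × Nat × Int)) : aEmp (u ++ v) = aEmp u ++ aEmp v := by
  simp [aEmp, gapRuns]

theorem findFragments_spec (disk : List Int) (hne : disk ≠ []) :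
    findFragments disk = (aOcc (runsAux 0 disk), aEmp ((runsAux 0 disk).dropLast)) := by
  have hrne : runsAux 0 disk ≠ [] := runsAux_ne_nil 0 disk hne
  have hff := ff_spec disk 0 disk rfl hne [] []
  norm_num at hff
  rw [show ((runsAux 0 disk).getLast?.getD (0, 0, 0)) = (runsAux 0 disk).getLastD (0, 0, 0)
    by rw [List.getLastD_eq_getLast?]] at hff
  have hsplit : (runsAux 0 disk).dropLast ++ [(runsAux 0 disk).getLastD (0, 0, 0)]
      = runsAux 0 disk := dropLast_append_getLastD _ hrne _
  have hmem : (runsAux 0 disk).getLastD (0, 0, 0) ∈ runsAux 0 disk := by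
    rw [List.getLastD_eq_getLast?, List.getLast?_eq_some_getLast hrne]
    simpa using List.getLast_mem hrne
  have hvlast : disk[((runsAux 0 disk).getLastD (0, 0, 0)).1]?
      = some ((runsAux 0 disk).getLastD (0, 0, 0)).2.2 := by
    have := runs_cells disk 0 disk rfl _ hmem 0
      (by
        have := chainR_ge _ _ _ (runs_chainR 0 disk) _ hmem
        omega)
    simpa using this
  have hglast : PySem.List.pyGetD disk (((runsAux 0 disk).getLastD (0, 0, 0)).1 : Int) 0
      = ((runsAux 0 disk).getLastD (0, 0, 0)).2.2 := by
    rw [PySem.List.pyGetD_natCast, List.getD_eq_getElem?_getD, hvlast]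
    rfl
  have hlastend : ((runsAux 0 disk).getLastD (0, 0, 0)).1
      + ((runsAux 0 disk).getLastD (0, 0, 0)).2.1 = disk.length := by
    have hch := runs_chainR 0 disk
    rw [← hsplit] at hch
    have := chainR_append_last _ _ _ _ hch
    omega
  unfold findFragments
  rw [hff]
  simp only [hglast]
  by_cases hneg : ((runsAux 0 disk).getLastD (0, 0, 0)).2.2 = -1
  · rw [if_neg (by simp only [hneg]; exact fun h => h rfl)]
    have haocc : aOcc (runsAux 0 disk) = aOcc ((runsAux 0 disk).dropLast) := by
      conv_lhs => rw [← hsplit]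
      rw [aOcc_append]
      have hone : aOcc [(runsAux 0 disk).getLastD (0, 0, 0)] = [] := by
        simp only [aOcc, fileRuns, List.filter_cons, List.filter_nil]
        rw [if_neg (by simpa using hneg)]
        simp
      rw [hone]
      simp
    rw [haocc]
  · rw [if_pos hneg]
    have haocc : aOcc (runsAux 0 disk) = aOcc ((runsAux 0 disk).dropLast)
        ++ [((((runsAux 0 disk).getLastD (0, 0, 0)).1 : Int), PySem.List.len disk - 1)] := by
      conv_lhs => rw [← hsplit]
      rw [aOcc_append]
      congr 1
      simp only [aOcc, fileRuns, List.filter_cons, List.filter_nil]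
      rw [if_pos (by simpa using hneg)]
      simp only [List.map_cons, List.map_nil]
      congr 2
      rw [PySem.List.len_eq]
      push_cast
      omega
    rw [haocc]

-- ---------- the per-file gap selection, abstractly ----------

-- scan a gap list for the first gap with start ≤ fs and size ≥ k, and apply A's update
def pickUpd (fs k : Int) : List (Int × Int) → List (Int × Int) × Option (Int × Int)
  | [] => ([], none)
  | g :: rest =>
    if g.1 ≤ fs ∧ k ≤ g.2 - g.1 + 1 then
      ((if g.2 < g.1 + k then rest else (g.1 + k, g.2) :: rest), some g)
    else
      let r := pickUpd fs k rest
      (g :: r.1, r.2)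

theorem pickUpd_no (fs k : Int) : ∀ (G : List (Int × Int)), (∀ g ∈ G, ¬ g.1 ≤ fs) →
    pickUpd fs k G = (G, none) := by
  intro G
  induction G with
  | nil => intro _; rfl
  | cons g rest ih =>
    intro h
    rw [pickUpd]
    rw [if_neg (by
      intro hc
      exact h g (List.mem_cons_self ..) hc.1)]
    rw [ih (fun g hg => h g (List.mem_cons_of_mem _ hg))]

theorem pickUpd_none (fs k : Int) : ∀ (G : List (Int × Int)),
    (pickUpd fs k G).2 = none →
    (pickUpd fs k G).1 = G ∧ ∀ g ∈ G, ¬ (g.1 ≤ fs ∧ k ≤ g.2 - g.1 + 1) := by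
  intro G
  induction G with
  | nil => intro _; exact ⟨rfl, by simp⟩
  | cons g rest ih =>
    intro h
    rw [pickUpd] at h ⊢
    by_cases hc : g.1 ≤ fs ∧ k ≤ g.2 - g.1 + 1
    · rw [if_pos hc] at h
      simp at h
    · rw [if_neg hc] at h ⊢
      simp only at h
      obtain ⟨h1, h2⟩ := ih h
      refine ⟨by simp [h1], ?_⟩
      intro x hx
      rcases List.mem_cons.mp hx with rfl | hx
      · exact hc
      · exact h2 x hx

theorem pickUpd_some (fs k : Int) : ∀ (G : List (Int × Int)) (g0 : Int × Int),
    (pickUpd fs k G).2 = some g0 →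
    ∃ pre post, G = pre ++ g0 :: post ∧
      (∀ p ∈ pre, ¬ (p.1 ≤ fs ∧ k ≤ p.2 - p.1 + 1)) ∧
      (g0.1 ≤ fs ∧ k ≤ g0.2 - g0.1 + 1) ∧
      (pickUpd fs k G).1
        = pre ++ (if g0.2 < g0.1 + k then post else (g0.1 + k, g0.2) :: post) := by
  intro G
  induction G with
  | nil => intro g0 h; simp [pickUpd] at h
  | cons g rest ih =>
    intro g0 h
    rw [pickUpd] at h ⊢
    by_cases hc : g.1 ≤ fs ∧ k ≤ g.2 - g.1 + 1
    · rw [if_pos hc] at h ⊢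
      simp only at h
      obtain rfl : g = g0 := by injection h
      exact ⟨[], rest, rfl, by simp, hc, by simp⟩
    · rw [if_neg hc] at h ⊢
      simp only at h ⊢
      obtain ⟨pre, post, hG, hpre, hg0, hupd⟩ := ih g0 h
      refine ⟨g :: pre, post, by simp [hG], ?_, hg0, by simp [hupd]⟩
      intro p hp
      rcases List.mem_cons.mp hp with rfl | hp
      · exact hc
      · exact hpre p hp

-- Python's list.remove on a reassembled list removes the designated element
theorem remove_position {α : Type} [BEq α] [LawfulBEq α] (pre rest : List α) (x : α)
    (hx : x ∉ pre) : PySem.List.remove? (pre ++ x :: rest) x = some (pre ++ rest) := by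
  induction pre with
  | nil => simp [PySem.List.remove?_cons_self]
  | cons a pre ih =>
    have ha : a ≠ x := fun h => hx (h ▸ List.mem_cons_self ..)
    rw [List.cons_append, PySem.List.remove?_cons_of_ne _ ha,
      ih (fun h => hx (List.mem_cons_of_mem _ h))]
    rfl

-- A's inner loop is exactly pickUpd on the not-yet-scanned suffix
theorem aInner_spec (fs k : Int) : ∀ (G acc : List (Int × Int)),
    ((acc.reverse ++ G).Pairwise (fun a b => a.2 < b.1)) →
    (∀ g ∈ acc.reverse ++ G, g.1 ≤ g.2) →
    aInner fs k acc G = (acc.reverse ++ (pickUpd fs k G).1, ((pickUpd fs k G).2).map (·.1)) := by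
  intro G
  induction G with
  | nil =>
    intro acc _ _
    simp [aInner, pickUpd]
  | cons g rest ih =>
    intro acc hpw hwf
    rw [aInner, pickUpd]
    by_cases hbr : g.1 > fs
    · rw [if_pos hbr]
      rw [if_neg (by intro hc; omega)]
      have hrest : pickUpd fs k rest = (rest, none) := by
        apply pickUpd_no
        intro r hr
        have hgr : g.2 < r.1 := by
          have := (List.pairwise_append.mp hpw).2.1
          exact (List.pairwise_cons.mp this).1 r hr
        have hgw : g.1 ≤ g.2 := hwf g (by simp)
        omega
      rw [hrest]
      simp
    · rw [if_neg hbr]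
      by_cases hfit : g.2 - g.1 + 1 ≥ k
      · rw [if_pos hfit, if_pos ⟨by omega, hfit⟩]
        simp only
        have hnotin : (g.1 + k, g.2) ∉ acc.reverse := by
          intro hmem
          have hlt : ∀ a ∈ acc.reverse, a.2 < g.1 := by
            intro a ha
            have := (List.pairwise_append.mp hpw).2.2 a ha g (by simp)
            exact this
          have := hlt _ hmem
          simp at this
          have hgw : g.1 ≤ g.2 := hwf g (by simp)
          omega
        by_cases hrem : g.1 + k > g.2
        · rw [if_pos hrem, if_pos (by omega)]
          rw [remove_position _ _ _ hnotin]
          rfl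
        · rw [if_neg hrem, if_neg (by omega)]
          rfl
      · rw [if_neg hfit, if_neg (by intro hc; exact hfit hc.2)]
        have hre : (acc.reverse ++ [g]) = (g :: acc).reverse := by simp
        have hpw' : ((g :: acc).reverse ++ rest).Pairwise (fun a b => a.2 < b.1) := by
          rw [← hre, List.append_assoc]
          simpa using hpw
        have hwf' : ∀ x ∈ (g :: acc).reverse ++ rest, x.1 ≤ x.2 := by
          intro x hx
          apply hwf
          rw [← hre, List.append_assoc] at hx
          simpa using hx
        rw [ih (g :: acc) hpw' hwf']
        simp

-- ---------- B's bucket search, abstractly ----------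

theorem bBest_append (k : Int) (ys : List (Int × List Int)) (p : Int × List Int) :
    bBest k (ys ++ [p]) = bBestStep k (bBest k ys) p := by
  unfold bBest
  rw [List.foldl_append]
  rfl

theorem bBest_none (k : Int) (items : List (Int × List Int)) (h : bBest k items = none) :
    ∀ p ∈ items, ¬ (k ≤ p.1 ∧ p.2 ≠ []) := by
  induction items using List.reverseRecOn with
  | nil => simp
  | append_singleton ys p ih =>
    rw [bBest_append] at h
    intro q hq
    by_cases hc : p.1 ≥ k ∧ p.2 ≠ []
    · exfalso
      rcases hmin : PySem.List.min? p.2 (fun x => x) with _ | m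
      · exact absurd hmin (by simpa [PySem.List.min?_eq_none_iff] using hc.2)
      · rcases hb : bBest k ys with _ | b
        · simp only [bBestStep, if_pos hc, hmin, hb] at h
          simp at h
        · simp only [bBestStep, if_pos hc, hmin, hb] at h
          split at h <;> simp at h
    · simp only [bBestStep, if_neg hc] at h
      rcases List.mem_append.mp hq with hq | hq
      · exact ih h q hq
      · simp at hq
        subst hq
        exact fun hcc => hc ⟨hcc.1, hcc.2⟩

theorem bBest_some (k : Int) (items : List (Int × List Int)) :
    ∀ (m bsz : Int), bBest k items = some (m, bsz) →
    (∃ p ∈ items, p.1 = bsz ∧ k ≤ p.1 ∧ m ∈ p.2) ∧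
    (∀ q ∈ items, k ≤ q.1 → ∀ y ∈ q.2, m ≤ y) := by
  induction items using List.reverseRecOn with
  | nil => intro m bsz h; simp [bBest] at h
  | append_singleton ys p ih =>
    intro m bsz h
    rw [bBest_append] at h
    by_cases hc : p.1 ≥ k ∧ p.2 ≠ []
    · rcases hmin : PySem.List.min? p.2 (fun x => x) with _ | m0
      · exact absurd hmin (by simpa [PySem.List.min?_eq_none_iff] using hc.2)
      · have hm0mem : m0 ∈ p.2 := PySem.List.min?_mem hmin
        have hm0min : ∀ y ∈ p.2, m0 ≤ y := fun y hy => PySem.List.min?_isMin hmin y hy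
        rcases hb : bBest k ys with _ | b
        · simp only [bBestStep, if_pos hc, hmin, hb, Option.some.injEq, Prod.mk.injEq] at h
          obtain ⟨rfl, rfl⟩ := h
          refine ⟨⟨p, by simp, rfl, hc.1, hm0mem⟩, ?_⟩
          intro q hq hkq y hy
          rcases List.mem_append.mp hq with hq | hq
          · exact absurd ⟨hkq, List.ne_nil_of_mem hy⟩ (bBest_none k ys hb q hq)
          · simp at hq
            subst hq
            exact hm0min y hy
        · simp only [bBestStep, if_pos hc, hmin, hb] at h
          obtain ⟨hbe, hbmin⟩ := ih b.1 b.2 (by rw [hb])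
          by_cases hlt : m0 < b.1
          · rw [if_pos hlt] at h
            simp only [Option.some.injEq, Prod.mk.injEq] at h
            obtain ⟨rfl, rfl⟩ := h
            refine ⟨⟨p, by simp, rfl, hc.1, hm0mem⟩, ?_⟩
            intro q hq hkq y hy
            rcases List.mem_append.mp hq with hq | hq
            · have := hbmin q hq hkq y hy
              omega
            · simp at hq
              subst hq
              exact hm0min y hy
          · rw [if_neg hlt] at h
            simp only [Option.some.injEq] at h
            obtain rfl : b = (m, bsz) := h
            obtain ⟨pe, hpe, h1, h2, h3⟩ := hbe
            refine ⟨⟨pe, List.mem_append_left _ hpe, h1, h2, h3⟩, ?_⟩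
            intro q hq hkq y hy
            rcases List.mem_append.mp hq with hq | hq
            · exact hbmin q hq hkq y hy
            · simp at hq
              subst hq
              have := hm0min y hy
              omega
    · simp only [bBestStep, if_neg hc] at h
      obtain ⟨⟨pe, hpe, h1, h2, h3⟩, hmin2⟩ := ih m bsz h
      refine ⟨⟨pe, List.mem_append_left _ hpe, h1, h2, h3⟩, ?_⟩
      intro q hq hkq y hy
      rcases List.mem_append.mp hq with hq | hq
      · exact hmin2 q hq hkq y hy
      · simp at hq
        subst hq
        exact absurd ⟨hkq, List.ne_nil_of_mem hy⟩ hc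

-- ---------- bucket-dictionary facts ----------

theorem getD_bBucketAdd (b : PySem.Dict Int (List Int)) (k v k' : Int) :
    (bBucketAdd b k v).getD k' [] = if k' = k then b.getD k [] ++ [v] else b.getD k' [] := by
  simp [bBucketAdd, PySem.Dict.getD_insert]

theorem mem_bAdds (ps : List (Int × Int)) : ∀ (b : PySem.Dict Int (List Int)) (kk x : Int),
    (x ∈ (ps.foldl (fun b p => bBucketAdd b p.1 p.2) b).getD kk [])
      ↔ x ∈ b.getD kk [] ∨ (kk, x) ∈ ps := by
  induction ps with
  | nil => simp
  | cons p ps ih =>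
    intro b kk x
    rw [List.foldl_cons, ih]
    rw [getD_bBucketAdd]
    by_cases hk : kk = p.1
    · subst hk
      rw [if_pos rfl]
      simp only [List.mem_append, List.mem_cons, List.not_mem_nil, or_false]
      constructor
      · rintro (⟨h | h⟩ | h)
        · exact Or.inl h
        · subst h
          exact Or.inr (Or.inl rfl)
        · exact Or.inr (Or.inr h)
      · rintro (h | h | h)
        · exact Or.inl (Or.inl h)
        · rw [Prod.ext_iff] at h
          exact Or.inl (Or.inr (by simpa using h.2))
        · exact Or.inr h
    · rw [if_neg hk]
      simp only [List.mem_cons]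
      constructor
      · rintro (h | h)
        · exact Or.inl h
        · exact Or.inr (Or.inr h)
      · rintro (h | h | h)
        · exact Or.inl h
        · rw [Prod.ext_iff] at h
          exact absurd (by simpa using h.1) hk
        · exact Or.inr h

theorem nodup_bAdds (ps : List (Int × Int)) : ∀ (b : PySem.Dict Int (List Int)),
    (∀ kk, (b.getD kk []).Nodup) → (∀ p ∈ ps, ∀ kk, p.2 ∉ b.getD kk []) →
    (ps.map (·.2)).Nodup →
    ∀ kk, ((ps.foldl (fun b p => bBucketAdd b p.1 p.2) b).getD kk []).Nodup := by
  induction ps with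
  | nil => intro b hb _ _; exact hb
  | cons p ps ih =>
    intro b hb hfresh hnd kk
    rw [List.foldl_cons]
    apply ih
    · intro k2
      rw [getD_bBucketAdd]
      by_cases hk : k2 = p.1
      · rw [if_pos hk]
        refine List.Nodup.append (hb p.1) (List.nodup_singleton _) ?_
        intro a ha hb2
        simp at hb2
        subst hb2
        exact hfresh p (List.mem_cons_self ..) p.1 ha
      · rw [if_neg hk]
        exact hb k2
    · intro q hq k2
      rw [getD_bBucketAdd]
      by_cases hk : k2 = p.1
      · rw [if_pos hk]
        intro hmem
        rcases List.mem_append.mp hmem with hmem | hmem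
        · exact hfresh q (List.mem_cons_of_mem _ hq) p.1 hmem
        · simp at hmem
          rw [List.map_cons] at hnd
          have := (List.nodup_cons.mp hnd).1
          exact this (by
            rw [← hmem]
            exact List.mem_map_of_mem hq)
      · rw [if_neg hk]
        exact hfresh q (List.mem_cons_of_mem _ hq) k2
    · exact (List.nodup_cons.mp (by rw [List.map_cons] at hnd; exact hnd)).2

-- ---------- coupling invariants between A's gap list and B's buckets ----------

-- A-side gap list: disjoint ordered nonempty intervals
def GapsOrd (G : List (Int × Int)) : Prop :=
  G.Pairwise (fun a b => a.2 < b.1) ∧ ∀ g ∈ G, g.1 ≤ g.2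
-- every gap is a right-suffix of an original gap run (same right end)
def GapsOrig (runs : List (Nat × Nat × Int)) (G : List (Int × Int)) : Prop :=
  ∀ g ∈ G, ∃ r ∈ runs, r.2.2 = -1 ∧ (r.1 : Int) ≤ g.1 ∧ g.2 = (r.1 : Int) + (r.2.1 : Int) - 1
-- B's buckets hold exactly the gaps of G, keyed by size, without duplicates
def BCorr (G : List (Int × Int)) (b : PySem.Dict Int (List Int)) : Prop :=
  (∀ sz st : Int, st ∈ b.getD sz [] ↔ ((st, st + sz - 1) ∈ G ∧ 1 ≤ sz)) ∧
  (∀ sz : Int, (b.getD sz []).Nodup) ∧ b.keys.Nodup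

theorem GapsOrd.nodup {G : List (Int × Int)} (h : GapsOrd G) : G.Nodup := by
  obtain ⟨hpw, hwf⟩ := h
  apply hpw.imp_of_mem
  intro a b ha hb hr he
  subst he
  have := hwf a ha
  omega

-- a gap never straddles a file run's start position
-- translate bBest's result through the bucket correspondence
theorem bBest_none_G (G : List (Int × Int)) (b : PySem.Dict Int (List Int)) (k : Int)
    (hk : 1 ≤ k) (hcorr : BCorr G b) (h : bBest k b.items = none) :
    ∀ g ∈ G, ¬ k ≤ g.2 - g.1 + 1 := by
  intro g hg hfit
  obtain ⟨hiff, hnd, hknd⟩ := hcorr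
  have hmem : g.1 ∈ b.getD (g.2 - g.1 + 1) [] := by
    rw [hiff]
    constructor
    · have : (g.1, g.1 + (g.2 - g.1 + 1) - 1) = g := by
        rw [Prod.ext_iff]
        constructor
        · rfl
        · simp only
          ring
      rw [this]
      exact hg
    · omega
  have hne : b.getD (g.2 - g.1 + 1) [] ≠ [] := List.ne_nil_of_mem hmem
  have hitem : (g.2 - g.1 + 1, b.getD (g.2 - g.1 + 1) []) ∈ b.items := by
    rcases hget : b.get? (g.2 - g.1 + 1) with _ | v
    · exact absurd (PySem.Dict.getD_of_get?_eq_none _ [] hget) hne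
    · have := PySem.Dict.mem_items_of_get?_eq_some _ hget
      rwa [PySem.Dict.getD_of_get?_eq_some _ [] hget]
  exact bBest_none k b.items h _ hitem ⟨hfit, hne⟩

theorem bBest_some_G (G : List (Int × Int)) (b : PySem.Dict Int (List Int)) (k m bsz : Int)
    (hk : 1 ≤ k) (hcorr : BCorr G b) (h : bBest k b.items = some (m, bsz)) :
    (m, m + bsz - 1) ∈ G ∧ k ≤ bsz ∧ (∀ g ∈ G, k ≤ g.2 - g.1 + 1 → m ≤ g.1) := by
  obtain ⟨hiff, hnd, hknd⟩ := hcorr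
  obtain ⟨⟨p, hp, hp1, hp2, hp3⟩, hmin⟩ := bBest_some k b.items m bsz h
  have hpv : b.getD p.1 [] = p.2 := PySem.Dict.getD_of_mem_items _ hp hknd []
  have hmG : (m, m + bsz - 1) ∈ G ∧ 1 ≤ bsz := by
    rw [← hiff]
    rw [hp1] at hpv
    rw [hpv]
    exact hp3
  refine ⟨hmG.1, by omega, ?_⟩
  intro g hg hfit
  have hmem : g.1 ∈ b.getD (g.2 - g.1 + 1) [] := by
    rw [hiff]
    constructor
    · have : (g.1, g.1 + (g.2 - g.1 + 1) - 1) = g := by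
        rw [Prod.ext_iff]
        constructor
        · rfl
        · simp only
          ring
      rw [this]
      exact hg
    · omega
  have hne : b.getD (g.2 - g.1 + 1) [] ≠ [] := List.ne_nil_of_mem hmem
  have hitem : (g.2 - g.1 + 1, b.getD (g.2 - g.1 + 1) []) ∈ b.items := by
    rcases hget : b.get? (g.2 - g.1 + 1) with _ | v
    · exact absurd (PySem.Dict.getD_of_get?_eq_none _ [] hget) hne
    · have := PySem.Dict.mem_items_of_get?_eq_some _ hget
      rwa [PySem.Dict.getD_of_get?_eq_some _ [] hget]
  exact hmin _ hitem hfit g.1 hmem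

-- ---------- preservation of the invariants under one gap update ----------

theorem mem_middle {α : Type} {x a : α} {pre Z : List α} :
    x ∈ pre ++ a :: Z ↔ x = a ∨ x ∈ pre ++ Z := by
  simp only [List.mem_append, List.mem_cons]
  tauto

theorem pairwise_replace {α : Type} {R : α → α → Prop} (pre Z : List α) (y y' : α)
    (h : (pre ++ y :: Z).Pairwise R)
    (h1 : ∀ a, R a y → R a y') (h2 : ∀ c, R y c → R y' c) :
    (pre ++ y' :: Z).Pairwise R := by
  rw [List.pairwise_append] at h ⊢
  obtain ⟨hp, hyz, hcross⟩ := h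
  rcases List.pairwise_cons.mp hyz with ⟨hyZ, hZ⟩
  refine ⟨hp, List.pairwise_cons.mpr ⟨fun c hc => h2 c (hyZ c hc), hZ⟩, ?_⟩
  intro a ha b hb
  rcases List.mem_cons.mp hb with rfl | hb
  · exact h1 a (hcross a ha y (List.mem_cons_self ..))
  · exact hcross a ha b (List.mem_cons_of_mem _ hb)

theorem gaps_upd (runs : List (Nat × Nat × Int)) (pre Z : List (Int × Int)) (g0 : Int × Int)
    (k : Int) (hk : 1 ≤ k)
    (hord : GapsOrd (pre ++ g0 :: Z)) (horig : GapsOrig runs (pre ++ g0 :: Z)) :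
    GapsOrd (pre ++ (if g0.2 < g0.1 + k then Z else (g0.1 + k, g0.2) :: Z)) ∧
    GapsOrig runs (pre ++ (if g0.2 < g0.1 + k then Z else (g0.1 + k, g0.2) :: Z)) := by
  have hsub : (pre ++ Z).Sublist (pre ++ g0 :: Z) :=
    (List.Sublist.refl pre).append (List.sublist_cons_self g0 Z)
  by_cases hrem : g0.2 < g0.1 + k
  · rw [if_pos hrem]
    refine ⟨⟨hord.1.sublist hsub, fun g hg => hord.2 g (hsub.mem hg)⟩,
      fun g hg => horig g (hsub.mem hg)⟩
  · rw [if_neg hrem]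
    refine ⟨⟨?_, ?_⟩, ?_⟩
    · exact pairwise_replace pre Z g0 _ hord.1 (fun a ha => by simp at ha ⊢; omega)
        (fun c hc => hc)
    · intro g hg
      rcases mem_middle.mp hg with rfl | hg
      · simp
        omega
      · exact hord.2 g (hsub.mem hg)
    · intro g hg
      rcases mem_middle.mp hg with rfl | hg
      · obtain ⟨r, hr, h1, h2, h3⟩ := horig g0 (by
          rw [mem_middle]
          exact Or.inl rfl)
        exact ⟨r, hr, h1, by simp; omega, by simpa using h3⟩
      · exact horig g (hsub.mem hg)

theorem bcorr_upd (pre Z : List (Int × Int)) (g0 : Int × Int) (k : Int)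
    (hk : 1 ≤ k) (hfit : k ≤ g0.2 - g0.1 + 1)
    (hord : GapsOrd (pre ++ g0 :: Z)) (b : PySem.Dict Int (List Int))
    (hcorr : BCorr (pre ++ g0 :: Z) b) :
    BCorr (pre ++ (if g0.2 < g0.1 + k then Z else (g0.1 + k, g0.2) :: Z))
      (if g0.2 - g0.1 + 1 - k > 0 then
        bBucketAdd
          (b.insert (g0.2 - g0.1 + 1)
            ((PySem.List.remove? (b.getD (g0.2 - g0.1 + 1) []) g0.1).getD
              (b.getD (g0.2 - g0.1 + 1) [])))
          (g0.2 - g0.1 + 1 - k) (g0.1 + k)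
      else
        b.insert (g0.2 - g0.1 + 1)
          ((PySem.List.remove? (b.getD (g0.2 - g0.1 + 1) []) g0.1).getD
            (b.getD (g0.2 - g0.1 + 1) []))) := by
  obtain ⟨hiff, hnd, hknd⟩ := hcorr
  have hndG : (pre ++ g0 :: Z).Nodup := hord.nodup
  have hg0G : g0 ∈ pre ++ g0 :: Z := mem_middle.mpr (Or.inl rfl)
  have hg0wf : g0.1 ≤ g0.2 := hord.2 g0 hg0G
  have hg0notin : g0 ∉ pre ++ Z := by
    rw [List.nodup_middle] at hndG
    exact (List.nodup_cons.mp hndG).1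
  have heta : (g0.1, g0.1 + (g0.2 - g0.1 + 1) - 1) = g0 := by
    rw [Prod.ext_iff]
    exact ⟨rfl, by simp; ring⟩
  have hmold : g0.1 ∈ b.getD (g0.2 - g0.1 + 1) [] := by
    rw [hiff]
    exact ⟨by rw [heta]; exact hg0G, by omega⟩
  have hrem : PySem.List.remove? (b.getD (g0.2 - g0.1 + 1) []) g0.1
      = some ((b.getD (g0.2 - g0.1 + 1) []).erase g0.1) :=
    PySem.List.remove?_eq_some_erase _ _ hmold
  have hb1getD : ∀ sz : Int,
      (b.insert (g0.2 - g0.1 + 1)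
        ((PySem.List.remove? (b.getD (g0.2 - g0.1 + 1) []) g0.1).getD
          (b.getD (g0.2 - g0.1 + 1) []))).getD sz []
      = if sz = g0.2 - g0.1 + 1 then (b.getD (g0.2 - g0.1 + 1) []).erase g0.1
        else b.getD sz [] := by
    intro sz
    rw [hrem]
    simp only [Option.getD_some]
    rw [PySem.Dict.getD_insert]
  -- membership of a pair in the updated gap list
  have hmemG' : ∀ (x : Int × Int),
      (x ∈ pre ++ (if g0.2 < g0.1 + k then Z else (g0.1 + k, g0.2) :: Z))
        ↔ ((x ∈ pre ++ g0 :: Z ∧ x ≠ g0) ∨ (¬ g0.2 < g0.1 + k ∧ x = (g0.1 + k, g0.2))) := by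
    intro x
    by_cases hcase : g0.2 < g0.1 + k
    · rw [if_pos hcase]
      constructor
      · intro hx
        refine Or.inl ⟨(mem_middle.mpr (Or.inr hx) : _), ?_⟩
        intro he
        subst he
        exact hg0notin hx
      · rintro (⟨hx, hne⟩ | ⟨hc, _⟩)
        · rcases mem_middle.mp hx with rfl | hx
          · exact absurd rfl hne
          · exact hx
        · exact absurd hcase hc
    · rw [if_neg hcase]
      rw [mem_middle]
      constructor
      · rintro (rfl | hx)
        · exact Or.inr ⟨hcase, rfl⟩
        · refine Or.inl ⟨mem_middle.mpr (Or.inr hx), ?_⟩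
          intro he
          subst he
          exact hg0notin hx
      · rintro (⟨hx, hne⟩ | ⟨_, rfl⟩)
        · rcases mem_middle.mp hx with rfl | hx
          · exact absurd rfl hne
          · exact Or.inr hx
        · exact Or.inl rfl
  -- the new gap (when any) was not a gap before
  have hfresh : ¬ g0.2 < g0.1 + k → (g0.1 + k, g0.2) ∉ pre ++ g0 :: Z := by
    intro hc hmem
    have hne : (g0.1 + k, g0.2) ≠ g0 := by
      intro he
      rw [Prod.ext_iff] at he
      simp at he
      omega
    rcases pairwise_mem_rel hord.1 hmem hg0G hne with hlt | hlt
    · simp at hlt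
      omega
    · simp at hlt
      omega
  constructor
  · -- membership iff
    intro sz st
    by_cases hcase : g0.2 - g0.1 + 1 - k > 0
    · rw [if_pos hcase, getD_bBucketAdd, hmemG']
      have hncase : ¬ g0.2 < g0.1 + k := by omega
      by_cases hsz : sz = g0.2 - g0.1 + 1 - k
      · rw [if_pos hsz, hb1getD]
        subst hsz
        rw [if_neg (by omega : ¬ g0.2 - g0.1 + 1 - k = g0.2 - g0.1 + 1)]
        constructor
        · intro hx
          rcases List.mem_append.mp hx with hx | hx
          · have := (hiff _ st).mp hx
            refine ⟨Or.inl ⟨this.1, ?_⟩, this.2⟩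
            intro he
            rw [Prod.ext_iff] at he
            simp at he
            omega
          · simp at hx
            subst hx
            refine ⟨Or.inr ⟨hncase, ?_⟩, by omega⟩
            rw [Prod.ext_iff]
            constructor
            · rfl
            · simp
              ring
        · rintro ⟨hx | hx, hsz1⟩
          · apply List.mem_append_left
            rw [hiff]
            exact ⟨hx.1, hsz1⟩
          · apply List.mem_append_right
            simp only [List.mem_singleton]
            rw [Prod.ext_iff] at hx
            have := hx.2.1
            simpa using this
      · rw [if_neg hsz, hb1getD]
        by_cases hsz2 : sz = g0.2 - g0.1 + 1
        · rw [if_pos hsz2]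
          subst hsz2
          rw [List.Nodup.mem_erase_iff (hnd _)]
          constructor
          · rintro ⟨hne, hx⟩
            have := (hiff _ st).mp hx
            refine ⟨Or.inl ⟨this.1, ?_⟩, this.2⟩
            intro he
            rw [Prod.ext_iff] at he
            exact hne (by simpa using he.1)
          · rintro ⟨hx | hx, hsz1⟩
            · refine ⟨?_, (hiff _ st).mpr ⟨hx.1, hsz1⟩⟩
              intro he
              subst he
              exact hx.2 heta
            · rw [Prod.ext_iff] at hx
              simp at hx
              omega
        · rw [if_neg hsz2]
          constructor
          · intro hx
            have := (hiff sz st).mp hx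
            refine ⟨Or.inl ⟨this.1, ?_⟩, this.2⟩
            intro he
            rw [Prod.ext_iff] at he
            simp at he
            omega
          · rintro ⟨hx | hx, hsz1⟩
            · rw [hiff]
              exact ⟨hx.1, hsz1⟩
            · rw [Prod.ext_iff] at hx
              simp at hx
              omega
    · rw [if_neg hcase, hb1getD, hmemG']
      have hyes : g0.2 < g0.1 + k := by omega
      by_cases hsz2 : sz = g0.2 - g0.1 + 1
      · rw [if_pos hsz2]
        subst hsz2
        rw [List.Nodup.mem_erase_iff (hnd _)]
        constructor
        · rintro ⟨hne, hx⟩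
          have := (hiff _ st).mp hx
          refine ⟨Or.inl ⟨this.1, ?_⟩, this.2⟩
          intro he
          rw [Prod.ext_iff] at he
          exact hne (by simpa using he.1)
        · rintro ⟨hx | hx, hsz1⟩
          · refine ⟨?_, (hiff _ st).mpr ⟨hx.1, hsz1⟩⟩
            intro he
            subst he
            exact hx.2 heta
          · exact absurd hyes hx.1
      · rw [if_neg hsz2]
        constructor
        · intro hx
          have := (hiff sz st).mp hx
          refine ⟨Or.inl ⟨this.1, ?_⟩, this.2⟩
          intro he
          rw [Prod.ext_iff] at he
          simp at he
          omega
        · rintro ⟨hx | hx, hsz1⟩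
          · rw [hiff]
            exact ⟨hx.1, hsz1⟩
          · exact absurd hyes hx.1
  constructor
  · -- per-bucket Nodup
    intro sz
    by_cases hcase : g0.2 - g0.1 + 1 - k > 0
    · rw [if_pos hcase, getD_bBucketAdd]
      by_cases hsz : sz = g0.2 - g0.1 + 1 - k
      · rw [if_pos hsz, hb1getD, if_neg (by omega : ¬ g0.2 - g0.1 + 1 - k = g0.2 - g0.1 + 1)]
        refine List.Nodup.append (hnd _) (List.nodup_singleton _) ?_
        intro a ha hb2
        simp at hb2
        subst hb2
        have := (hiff _ _).mp ha
        have hne : (g0.1 + k, g0.1 + k + (g0.2 - g0.1 + 1 - k) - 1) = (g0.1 + k, g0.2) := by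
          rw [Prod.ext_iff]
          exact ⟨rfl, by simp; ring⟩
        rw [hne] at this
        exact hfresh (by omega) this.1
      · rw [if_neg hsz, hb1getD]
        by_cases hsz2 : sz = g0.2 - g0.1 + 1
        · rw [if_pos hsz2]
          exact (hnd _).erase _
        · rw [if_neg hsz2]
          exact hnd _
    · rw [if_neg hcase, hb1getD]
      by_cases hsz2 : sz = g0.2 - g0.1 + 1
      · rw [if_pos hsz2]
        exact (hnd _).erase _
      · rw [if_neg hsz2]
        exact hnd _
  · -- keys Nodup
    by_cases hcase : g0.2 - g0.1 + 1 - k > 0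
    · rw [if_pos hcase]
      exact PySem.Dict.nodup_keys_insert _ _ _ (PySem.Dict.nodup_keys_insert _ _ _ hknd)
    · rw [if_neg hcase]
      exact PySem.Dict.nodup_keys_insert _ _ _ hknd

-- ---------- one file step: A's scan and B's bucket query move the same file ----------

theorem aOuterStep_none (disk res : List Int) (L emp' : List (Int × Int)) (a b : Int)
    (h : aInner a (b - a + 1) [] L = (emp', none)) :
    aOuterStep disk (res, L) (a, b) = (res, emp') := by
  unfold aOuterStep
  simp only [h]

theorem aOuterStep_some (disk res : List Int) (L emp' : List (Int × Int)) (a b es : Int)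
    (h : aInner a (b - a + 1) [] L = (emp', some es)) :
    aOuterStep disk (res, L) (a, b) =
      (pySetSlice
        (pySetSlice res es (es + (b - a + 1))
          (PySem.List.slice disk (some a) (some (a + (b - a + 1)))))
        a (a + (b - a + 1)) (List.replicate (b - a + 1).toNat (-1)), emp') := by
  unfold aOuterStep
  simp only [h]

theorem bStep_none (disk res : List Int) (bk : PySem.Dict Int (List Int)) (a k : Int)
    (hbb : bBest k bk.items = none) : bStep disk (res, bk) (a, k) = (res, bk) := by
  unfold bStep
  simp only [hbb]

theorem bStep_some (disk res : List Int) (bk : PySem.Dict Int (List Int)) (a k m bsz : Int)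
    (hbb : bBest k bk.items = some (m, bsz)) :
    bStep disk (res, bk) (a, k) =
      if m ≤ a then
        (pySetSlice
          (pySetSlice res m (m + k) (PySem.List.slice disk (some a) (some (a + k))))
          a (a + k) (List.replicate k.toNat (-1)),
         if bsz - k > 0 then
           bBucketAdd
             (bk.insert bsz ((PySem.List.remove? (bk.getD bsz []) m).getD (bk.getD bsz [])))
             (bsz - k) (m + k)
         else
           bk.insert bsz ((PySem.List.remove? (bk.getD bsz []) m).getD (bk.getD bsz [])))
      else (res, bk) := by
  unfold bStep
  simp only [hbb]

theorem step_eq (disk : List Int) (runs : List (Nat × Nat × Int)) (T : List (Int × Int))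
    (fs kf : Nat) (vf : Int)
    (hchain : chainR 0 disk.length runs)
    (hmem : (fs, kf, vf) ∈ runs) (hvf : vf ≠ -1)
    (hT : ∀ t ∈ T, ∀ r ∈ runs, r.2.2 ≠ -1 → (r.1 : Int) < t.1)
    (res : List Int) (L : List (Int × Int)) (bk : PySem.Dict Int (List Int))
    (hord : GapsOrd (L ++ T)) (horig : GapsOrig runs (L ++ T)) (hcorr : BCorr (L ++ T) bk) :
    (aOuterStep disk (res, L) ((fs : Int), (fs : Int) + (kf : Int) - 1)).1
      = (bStep disk (res, bk) ((fs : Int), (kf : Int))).1 ∧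
    GapsOrd ((aOuterStep disk (res, L) ((fs : Int), (fs : Int) + (kf : Int) - 1)).2 ++ T) ∧
    GapsOrig runs ((aOuterStep disk (res, L) ((fs : Int), (fs : Int) + (kf : Int) - 1)).2 ++ T) ∧
    BCorr ((aOuterStep disk (res, L) ((fs : Int), (fs : Int) + (kf : Int) - 1)).2 ++ T)
      (bStep disk (res, bk) ((fs : Int), (kf : Int))).2 := by
  have hkf1 : 1 ≤ kf := (chainR_ge _ _ _ hchain _ hmem).2.1
  have hkpos : (1 : Int) ≤ (kf : Int) := by exact_mod_cast hkf1
  have hbs : ((fs : Int) + (kf : Int) - 1) - (fs : Int) + 1 = (kf : Int) := by ring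
  have hPL : L.Pairwise (fun a b => a.2 < b.1) :=
    List.Pairwise.sublist (List.sublist_append_left L T) hord.1
  have hwfL : ∀ g ∈ L, g.1 ≤ g.2 := fun g hg => hord.2 g (List.mem_append_left _ hg)
  have hTf : ∀ t ∈ T, (fs : Int) < t.1 := fun t ht => hT t ht _ hmem hvf
  have hain : aInner (fs : Int) (kf : Int) [] L
      = ((pickUpd (fs : Int) (kf : Int) L).1,
         ((pickUpd (fs : Int) (kf : Int) L).2).map (·.1)) := by
    have := aInner_spec (fs : Int) (kf : Int) L [] (by simpa using hPL) (by simpa using hwfL)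
    simpa using this
  have hain' : aInner (fs : Int) (((fs : Int) + (kf : Int) - 1) - (fs : Int) + 1) [] L
      = ((pickUpd (fs : Int) (kf : Int) L).1,
         ((pickUpd (fs : Int) (kf : Int) L).2).map (·.1)) := by
    rw [hbs]
    exact hain
  rcases hpick : (pickUpd (fs : Int) (kf : Int) L).2 with _ | g0
  · -- A moves nothing
    obtain ⟨hL1, hnofit⟩ := pickUpd_none _ _ L hpick
    have hA : aOuterStep disk (res, L) ((fs : Int), (fs : Int) + (kf : Int) - 1) = (res, L) := by
      rw [aOuterStep_none disk res L L _ _ (by rw [hain', hpick, hL1]; rfl)]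
    rcases hbb : bBest (kf : Int) bk.items with _ | mb
    · rw [hA, bStep_none disk res bk _ _ hbb]
      exact ⟨rfl, hord, horig, hcorr⟩
    · obtain ⟨m, bsz⟩ := mb
      obtain ⟨hgmG, hkbsz, hmin⟩ := bBest_some_G (L ++ T) bk (kf : Int) m bsz hkpos hcorr hbb
      have hnle : ¬ m ≤ (fs : Int) := by
        intro hle
        rcases List.mem_append.mp hgmG with hin | hin
        · exact hnofit _ hin ⟨hle, by simp; omega⟩
        · have := hTf _ hin
          simp at this
          omega
      rw [hA, bStep_some disk res bk _ _ m bsz hbb, if_neg hnle]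
      exact ⟨rfl, hord, horig, hcorr⟩
  · -- A moves the file into gap g0; B must find the same gap
    obtain ⟨pre, post, hG, hpre, hg0elig, hupd⟩ := pickUpd_some _ _ L g0 hpick
    have hdecomp : L ++ T = pre ++ g0 :: (post ++ T) := by
      rw [hG]
      simp
    have hg0G : g0 ∈ L ++ T :=
      List.mem_append_left _ (by rw [hG]; exact mem_middle.mpr (Or.inl rfl))
    have hg0wf : g0.1 ≤ g0.2 := hord.2 g0 hg0G
    rcases hbb : bBest (kf : Int) bk.items with _ | mb
    · exact absurd hg0elig.2 (bBest_none_G (L ++ T) bk (kf : Int) hkpos hcorr hbb g0 hg0G)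
    obtain ⟨m, bsz⟩ := mb
    obtain ⟨hgmG, hkbsz, hmin⟩ := bBest_some_G (L ++ T) bk (kf : Int) m bsz hkpos hcorr hbb
    have hmle : m ≤ g0.1 := hmin g0 hg0G hg0elig.2
    have hmfs : m ≤ (fs : Int) := le_trans hmle hg0elig.1
    have hgm_eq : (m, m + bsz - 1) = g0 := by
      rcases List.mem_append.mp hgmG with hin | hin
      · rw [hG] at hin
        rcases mem_middle.mp hin with he | hin
        · exact he
        · exfalso
          rcases List.mem_append.mp hin with hin | hin
          · exact hpre _ hin ⟨hmfs, by simp; omega⟩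
          · have hpw := hord.1
            rw [hdecomp] at hpw
            have := (List.pairwise_append.mp hpw).2
            have h2 := (List.pairwise_cons.mp this.1).1 (m, m + bsz - 1)
              (List.mem_append_left _ hin)
            simp at h2
            omega
      · exfalso
        have := hTf _ hin
        simp at this
        omega
    have hm : m = g0.1 := by
      have := congrArg Prod.fst hgm_eq
      simpa using this
    have hbszv : bsz = g0.2 - g0.1 + 1 := by
      have := congrArg Prod.snd hgm_eq
      simp at this
      omega
    subst hm
    subst hbszv
    have hA := aOuterStep_some disk res L (pickUpd (fs : Int) (kf : Int) L).1
      (fs : Int) ((fs : Int) + (kf : Int) - 1) g0.1 (by rw [hain', hpick]; rfl)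
    have hB := bStep_some disk res bk (fs : Int) (kf : Int) g0.1 (g0.2 - g0.1 + 1) hbb
    rw [hB, if_pos hg0elig.1] at *
    rw [hA, hbs, hupd]
    obtain ⟨hord', horig'⟩ := gaps_upd runs pre (post ++ T) g0 (kf : Int) hkpos
      (hdecomp ▸ hord) (hdecomp ▸ horig)
    have hbc := bcorr_upd pre (post ++ T) g0 (kf : Int) hkpos hg0elig.2
      (hdecomp ▸ hord) bk (hdecomp ▸ hcorr)
    have hassoc : (pre ++ (if g0.2 < g0.1 + (kf : Int) then post
          else (g0.1 + (kf : Int), g0.2) :: post)) ++ T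
        = pre ++ (if g0.2 < g0.1 + (kf : Int) then post ++ T
          else (g0.1 + (kf : Int), g0.2) :: (post ++ T)) := by
      by_cases hc : g0.2 < g0.1 + (kf : Int) <;> simp [hc]
    refine ⟨rfl, ?_, ?_, ?_⟩
    · rw [hassoc]
      exact hord'
    · rw [hassoc]
      exact horig'
    · rw [hassoc]
      by_cases hc : g0.2 - g0.1 + 1 - (kf : Int) > 0
      · rw [if_pos hc] at hbc ⊢
        rwa [if_neg (by omega : ¬ g0.2 < g0.1 + (kf : Int))] at hbc ⊢
      · rw [if_neg hc] at hbc ⊢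
        rwa [if_pos (by omega : g0.2 < g0.1 + (kf : Int))] at hbc ⊢

-- ---------- the whole compaction fold, coupled ----------

theorem fold_eq (disk : List Int) (runs : List (Nat × Nat × Int)) (T : List (Int × Int))
    (hchain : chainR 0 disk.length runs)
    (hT : ∀ t ∈ T, ∀ r ∈ runs, r.2.2 ≠ -1 → (r.1 : Int) < t.1) :
    ∀ (fl : List (Nat × Nat × Int)) (res : List Int) (L : List (Int × Int))
      (bk : PySem.Dict Int (List Int)),
      (∀ f ∈ fl, f ∈ runs ∧ f.2.2 ≠ -1) →
      GapsOrd (L ++ T) → GapsOrig runs (L ++ T) → BCorr (L ++ T) bk →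
      ((fl.map (fun r => ((r.1 : Int), (r.1 : Int) + (r.2.1 : Int) - 1))).foldl
          (aOuterStep disk) (res, L)).1
        = ((fl.map (fun r => ((r.1 : Int), (r.2.1 : Int)))).foldl (bStep disk) (res, bk)).1 := by
  intro fl
  induction fl with
  | nil => intro res L bk _ _ _ _; rfl
  | cons f fl ih =>
    intro res L bk hfl hord horig hcorr
    obtain ⟨fs, kf, vf⟩ := f
    have hf := hfl _ (List.mem_cons_self ..)
    obtain ⟨h1, h2, h3, h4⟩ := step_eq disk runs T fs kf vf hchain hf.1 hf.2 hT res L bk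
      hord horig hcorr
    rw [List.map_cons, List.map_cons, List.foldl_cons, List.foldl_cons]
    have hAe : aOuterStep disk (res, L) ((fs : Int), (fs : Int) + (kf : Int) - 1)
        = ((aOuterStep disk (res, L) ((fs : Int), (fs : Int) + (kf : Int) - 1)).1,
           (aOuterStep disk (res, L) ((fs : Int), (fs : Int) + (kf : Int) - 1)).2) := rfl
    have hBe : bStep disk (res, bk) ((fs : Int), (kf : Int))
        = ((bStep disk (res, bk) ((fs : Int), (kf : Int))).1,
           (bStep disk (res, bk) ((fs : Int), (kf : Int))).2) := rfl
    rw [hAe, hBe, ← h1]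
    exact ih _ _ _ (fun g hg => hfl g (List.mem_cons_of_mem _ hg)) h2 h3 h4

-- ---------- initial states satisfy the coupling ----------

theorem gapRuns_facts (runs : List (Nat × Nat × Int)) (n : Nat) (hchain : chainR 0 n runs) :
    (gapRuns runs).Pairwise (fun a b => a.1 + a.2.1 ≤ b.1) ∧
    (∀ r ∈ gapRuns runs, 1 ≤ r.2.1 ∧ r.2.2 = -1 ∧ r ∈ runs) := by
  constructor
  · exact (chainR_pairwise _ _ _ hchain).sublist (List.filter_sublist)
  · intro r hr
    have hmem : r ∈ runs := List.mem_of_mem_filter hr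
    have hv : r.2.2 = -1 := by
      have := List.of_mem_filter hr
      simpa using this
    exact ⟨(chainR_ge _ _ _ hchain _ hmem).2.1, hv, hmem⟩

theorem aEmp_ord (runs : List (Nat × Nat × Int)) (n : Nat) (hchain : chainR 0 n runs) :
    GapsOrd (aEmp runs) := by
  obtain ⟨hpw, hfacts⟩ := gapRuns_facts runs n hchain
  constructor
  · unfold aEmp
    rw [List.pairwise_map]
    apply hpw.imp_of_mem
    intro a b ha hb hr
    simp only
    have := (hfacts a ha).1
    have := (hfacts b hb).1
    push_cast
    omega
  · intro g hg
    unfold aEmp at hg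
    obtain ⟨r, hr, rfl⟩ := List.mem_map.mp hg
    have := (hfacts r hr).1
    simp only
    omega

theorem aEmp_orig (runs : List (Nat × Nat × Int)) (n : Nat) (hchain : chainR 0 n runs) :
    GapsOrig runs (aEmp runs) := by
  obtain ⟨hpw, hfacts⟩ := gapRuns_facts runs n hchain
  intro g hg
  unfold aEmp at hg
  obtain ⟨r, hr, rfl⟩ := List.mem_map.mp hg
  exact ⟨r, (hfacts r hr).2.2, (hfacts r hr).2.1, by simp, by simp⟩

theorem bucket0_corr (runs : List (Nat × Nat × Int)) (n : Nat) (hchain : chainR 0 n runs) :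
    BCorr (aEmp runs)
      ((bGapPairs runs).foldl (fun b p => bBucketAdd b p.1 p.2) PySem.Dict.empty) := by
  obtain ⟨hpw, hfacts⟩ := gapRuns_facts runs n hchain
  have hne : (gapRuns runs).Pairwise (fun a b => ((a.1 : Int)) ≠ ((b.1 : Int))) := by
    apply hpw.imp_of_mem
    intro a b ha hb hr
    have := (hfacts a ha).1
    intro he
    have : a.1 = b.1 := by exact_mod_cast he
    omega
  have hstarts : ((bGapPairs runs).map (·.2)).Nodup := by
    unfold bGapPairs
    rw [List.map_map]
    simp only [List.Nodup, List.pairwise_map]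
    exact hne.imp (fun h => by simpa using h)
  have hgetD0 : ∀ sz : Int, (PySem.Dict.empty : PySem.Dict Int (List Int)).getD sz [] = [] := by
    intro sz
    simp
  refine ⟨?_, ?_, ?_⟩
  · intro sz st
    rw [mem_bAdds, hgetD0]
    simp only [List.not_mem_nil, false_or]
    unfold bGapPairs aEmp
    constructor
    · intro h
      obtain ⟨r, hr, he⟩ := List.mem_map.mp h
      rw [Prod.ext_iff] at he
      simp only at he
      have hsize := (hfacts r hr).1
      refine ⟨List.mem_map.mpr ⟨r, hr, ?_⟩, by omega⟩
      rw [Prod.ext_iff]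
      simp only
      constructor <;> omega
    · rintro ⟨h, hsz⟩
      obtain ⟨r, hr, he⟩ := List.mem_map.mp h
      rw [Prod.ext_iff] at he
      simp only at he
      refine List.mem_map.mpr ⟨r, hr, ?_⟩
      rw [Prod.ext_iff]
      simp only
      constructor <;> omega
  · intro sz
    apply nodup_bAdds _ _ (fun kk => by rw [hgetD0]; exact List.nodup_nil)
      (fun p _ kk => by rw [hgetD0]; exact List.not_mem_nil) hstarts
  · exact PySem.Dict.nodup_keys_foldl_insert_key _ (fun (x : Int × Int) => x.1)
      (fun (d : PySem.Dict Int (List Int)) (x : Int × Int) => d.getD x.1 [] ++ [x.2])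
      PySem.Dict.empty (by simp)

-- ---------- the trailing gap (if any) lies right of every file ----------

theorem trailT (disk : List Int) (hne : disk ≠ []) :
    ∀ t ∈ aEmp [(runsAux 0 disk).getLastD (0, 0, 0)], ∀ r ∈ runsAux 0 disk,
      r.2.2 ≠ -1 → (r.1 : Int) < t.1 := by
  have hrne : runsAux 0 disk ≠ [] := runsAux_ne_nil 0 disk hne
  have hchain : chainR 0 disk.length (runsAux 0 disk) := by
    simpa using runs_chainR 0 disk
  have hsplit : (runsAux 0 disk).dropLast ++ [(runsAux 0 disk).getLastD (0, 0, 0)]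
      = runsAux 0 disk := dropLast_append_getLastD _ hrne _
  have hlastmem : (runsAux 0 disk).getLastD (0, 0, 0) ∈ runsAux 0 disk := by
    rw [List.getLastD_eq_getLast?, List.getLast?_eq_some_getLast hrne]
    simpa using List.getLast_mem hrne
  have hlastend : ((runsAux 0 disk).getLastD (0, 0, 0)).1
      + ((runsAux 0 disk).getLastD (0, 0, 0)).2.1 = disk.length := by
    have hch := hchain
    rw [← hsplit] at hch
    exact chainR_append_last _ _ _ _ hch
  intro t ht r hr hrv
  unfold aEmp gapRuns at ht
  obtain ⟨r0, hr0, rfl⟩ := List.mem_map.mp ht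
  have hr0f := List.mem_filter.mp hr0
  have hr0mem : r0 = (runsAux 0 disk).getLastD (0, 0, 0) := by
    simpa using hr0f.1
  have hr0v : r0.2.2 = -1 := by
    simpa using hr0f.2
  subst hr0mem
  have hrne2 : r ≠ (runsAux 0 disk).getLastD (0, 0, 0) := by
    intro he
    rw [he] at hrv
    exact hrv hr0v
  have hrsz := (chainR_ge _ _ _ hchain _ hr).2
  simp only
  rcases pairwise_mem_rel (chainR_pairwise _ _ _ hchain) hr hlastmem hrne2 with hlt | hlt
  · have hlt' : r.1 + r.2.1 ≤ ((runsAux 0 disk).getLastD (0, 0, 0)).1 := hlt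
    exact_mod_cast by omega
  · exfalso
    have hlt' : ((runsAux 0 disk).getLastD (0, 0, 0)).1
        + ((runsAux 0 disk).getLastD (0, 0, 0)).2.1 ≤ r.1 := hlt
    omega

-- ===== VERDICT (by name: the statement is the Claim_ definition above) =====
theorem defragment_spec : Claim_equal_defragment := by
  intro disk _ hpre
  unfold Spec_defragment
  have hne : disk ≠ [] := hpre
  have hrne : runsAux 0 disk ≠ [] := runsAux_ne_nil 0 disk hne
  have hchain : chainR 0 disk.length (runsAux 0 disk) := by
    simpa using runs_chainR 0 disk
  have hsplit : (runsAux 0 disk).dropLast ++ [(runsAux 0 disk).getLastD (0, 0, 0)]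
      = runsAux 0 disk := dropLast_append_getLastD _ hrne _
  have hG0 : aEmp (runsAux 0 disk)
      = aEmp ((runsAux 0 disk).dropLast) ++ aEmp [(runsAux 0 disk).getLastD (0, 0, 0)] := by
    rw [← aEmp_append, hsplit]
  have hscan := bScan_spec disk 0 disk rfl [] PySem.Dict.empty
  norm_num at hscan
  have hford := aEmp_ord (runsAux 0 disk) disk.length hchain
  have hforig := aEmp_orig (runsAux 0 disk) disk.length hchain
  have hfcorr := bucket0_corr (runsAux 0 disk) disk.length hchain
  rw [hG0] at hford hforig hfcorr
  have hfold := fold_eq disk (runsAux 0 disk) (aEmp [(runsAux 0 disk).getLastD (0, 0, 0)])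
    hchain (trailT disk hne) ((fileRuns (runsAux 0 disk)).reverse) disk
    (aEmp ((runsAux 0 disk).dropLast)) _
    (by
      intro f hf
      rw [List.mem_reverse] at hf
      refine ⟨List.mem_of_mem_filter hf, ?_⟩
      have := List.of_mem_filter hf
      simpa using this)
    hford hforig hfcorr
  unfold defragment defragment_alt
  rw [findFragments_spec disk hne, hscan]
  have hmapA : (aOcc (runsAux 0 disk)).reverse
      = ((fileRuns (runsAux 0 disk)).reverse).map
          (fun r => ((r.1 : Int), (r.1 : Int) + (r.2.1 : Int) - 1)) := by
    unfold aOcc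
    rw [List.map_reverse]
  have hmapB : (bFiles (runsAux 0 disk)).reverse
      = ((fileRuns (runsAux 0 disk)).reverse).map
          (fun r => ((r.1 : Int), (r.2.1 : Int))) := by
    unfold bFiles
    rw [List.map_reverse]
  simp only [hmapA, hmapB]
  rw [hfold]
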